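-- pv_equiv track=rewrite | github.com/PreludeAndFugue/AdventOfCode | 2017/17_1.py | spinlock2
-- ===== SOURCE A (Python) =====
-- def spinlock2(step, count):
--     '''Run a spinlock and calculate what appears at index 1.
--
--     Don't need a list or deque in this case because know that 0 will always be
--     at index zero in list.
--     '''
--     in_position_1 = 1
--     position = 0
--     for i in range(1, count + 1):
--         position = (position + step) % i
--         if position == 0:
--             in_position_1 = i
--         position += 1
--     return in_position_1
-- ===== SOURCE B (Python) =====
-- def spinlock2(step, count):
--     inserts = []
--     pos = 0
--     for i in range(1, count + 1):
--         pos = (pos + step) % i + 1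
--         inserts.append((i, pos))
--     for i, p in reversed(inserts):
--         if p == 1:
--             return i
--     return 1
-- ===== Notes on version B (the rewrite author's own statement) =====
-- stated objective: alternative
-- what changed: A updates a running 'last value seen at index 1' scalar inside the simulation loop; B splits the work into two phases: record every insertion (i, position) in a list, then scan the records back-to-front and return the first insertion at position 1 (default 1 when none).
import Mathlib
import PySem

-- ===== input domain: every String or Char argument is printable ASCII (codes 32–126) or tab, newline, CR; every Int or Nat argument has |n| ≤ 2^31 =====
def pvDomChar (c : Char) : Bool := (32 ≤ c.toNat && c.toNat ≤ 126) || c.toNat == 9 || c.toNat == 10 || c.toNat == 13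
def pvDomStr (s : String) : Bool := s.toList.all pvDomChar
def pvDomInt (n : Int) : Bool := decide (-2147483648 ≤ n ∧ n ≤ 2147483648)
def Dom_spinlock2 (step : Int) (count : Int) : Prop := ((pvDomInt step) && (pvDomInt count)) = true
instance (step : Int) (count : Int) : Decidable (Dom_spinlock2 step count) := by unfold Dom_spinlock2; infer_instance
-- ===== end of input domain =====

-- B replaces A's running "last value seen at index 1" update by two phases: record every
-- insertion (i, position), then scan the records back-to-front for the last insertion at
-- position 1 (default 1); alternative, not faster.

-- ===== PORT A =====
-- for i in range(1, count+1): position = (position+step) % i; if position == 0: in_position_1 = i; position += 1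
def spinlock2 (step : Int) (count : Int) : Int :=
  ((PySem.List.pyRange 1 (count + 1) 1).foldl
    (fun (st : Int × Int) i =>
      let position := PySem.Int.mod (st.1 + step) i
      (position + 1, if position = 0 then i else st.2))
    (0, 1)).2

-- ===== PORT B =====
-- phase 1: inserts.append((i, (pos+step) % i + 1)) for i in range(1, count+1); the fold conses,
-- so it builds exactly reversed(inserts) (appending per step would be quadratic in Lean).
-- phase 2: the 'for i, p in reversed(inserts): if p == 1: return i / return 1' scan is find? on
-- that reversed list, with default 1.
def spinlock2_alt (step : Int) (count : Int) : Int :=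
  let revInserts := ((PySem.List.pyRange 1 (count + 1) 1).foldl
    (fun (st : Int × List (Int × Int)) i =>
      let pos := PySem.Int.mod (st.1 + step) i + 1
      (pos, (i, pos) :: st.2))
    (0, [])).2
  (((revInserts.find? (fun q => q.2 == 1)).map (·.1)).getD 1)

-- ===== PRECONDITION & SPEC =====
def Spec_spinlock2 (step : Int) (count : Int) (out : Int) : Prop := out = spinlock2_alt step count
instance (step : Int) (count : Int) (out : Int) : Decidable (Spec_spinlock2 step count out) := by unfold Spec_spinlock2; infer_instance

-- ===== CLAIM (what is proved, stated in full; the proofs are below) =====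
def Claim_equal_spinlock2 : Prop := ∀ (step : Int) (count : Int), Dom_spinlock2 step count → Spec_spinlock2 step count (spinlock2 step count)

-- ===== LEMMAS AND PROOFS =====

-- Joint loop invariant after n iterations: positions agree, and the back-to-front search
-- over B's recorded insertions yields A's running in_position_1 (default 1).
theorem spinlock2_inv (step : Int) (n : Nat) :
    let a := ((PySem.List.pyRange 1 ((n : Int) + 1) 1).foldl
      (fun (st : Int × Int) i =>
        let position := PySem.Int.mod (st.1 + step) i
        (position + 1, if position = 0 then i else st.2)) (0, 1))
    let b := ((PySem.List.pyRange 1 ((n : Int) + 1) 1).foldl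
      (fun (st : Int × List (Int × Int)) i =>
        let pos := PySem.Int.mod (st.1 + step) i + 1
        (pos, (i, pos) :: st.2)) (0, []))
    a.1 = b.1 ∧ (((b.2.find? (fun q => q.2 == 1)).map (·.1)).getD 1) = a.2 := by
  induction n with
  | zero => simp
  | succ n ih =>
      intro a b
      obtain ⟨h1, h5⟩ := ih
      have hrange : PySem.List.pyRange 1 ((↑(n+1) : Int) + 1) 1
          = PySem.List.pyRange 1 ((n : Int) + 1) 1 ++ [(n : Int) + 1] := by
        push_cast
        rw [← PySem.List.pyRange_one_succ_right (by omega : (1:Int) ≤ (n:Int)+1)]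
      simp only [a, b, hrange, List.foldl_append, List.foldl_cons, List.foldl_nil]
      set A := ((PySem.List.pyRange 1 ((n : Int) + 1) 1).foldl
        (fun (st : Int × Int) i =>
          let position := PySem.Int.mod (st.1 + step) i
          (position + 1, if position = 0 then i else st.2)) (0, 1)) with hA
      set B := ((PySem.List.pyRange 1 ((n : Int) + 1) 1).foldl
        (fun (st : Int × List (Int × Int)) i =>
          let pos := PySem.Int.mod (st.1 + step) i + 1
          (pos, (i, pos) :: st.2)) (0, [])) with hB
      set m := PySem.Int.mod (A.1 + step) ((n:Int)+1) with hm
      have hBm : PySem.Int.mod (B.1 + step) ((n:Int)+1) = m := by rw [hm, h1]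
      simp only [hBm]
      refine ⟨trivial, ?_⟩
      rw [List.find?_cons]
      by_cases hz : m = 0
      · simp [hz]
      · have hne : ((m + 1 == (1:Int)) = false) := by simp; omega
        simp only [hne, if_neg hz]
        exact h5

-- ===== VERDICT (by name: the statement is the Claim_ definition above) =====
theorem spinlock2_spec : Claim_equal_spinlock2 := by
  intro step count _
  unfold Spec_spinlock2 spinlock2 spinlock2_alt
  by_cases hc : count < 1
  · rw [PySem.List.pyRange_one_eq_nil (by omega : count + 1 ≤ 1)]
    simp
  · have hn : count = ((count.toNat : Nat) : Int) := by omega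
    rw [hn]
    obtain ⟨h1, h5⟩ := spinlock2_inv step count.toNat
    rw [← h5]
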